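-- pv_equiv track=rewrite | github.com/SmitSuthar8834/Nia-_CRM | apps/debriefings/ai_integration.py | _customize_questions_for_meeting_type
-- ===== SOURCE A (Python) =====
-- from typing import Dict, List, Any, Optional
--
-- def _customize_questions_for_meeting_type(
--
--     questions: List[Dict[str, Any]],
--     meeting_type: str
-- ) -> List[Dict[str, Any]]:
--     """Customize questions based on meeting type"""
--     customized = []
--
--     for question in questions:
--         customized_question = question.copy()
--
--         # Customize based on meeting type
--         if meeting_type == 'discovery':
--             if question['question_type'] == 'outcome':
--                 customized_question['question_text'] = 'How successful was this discovery call in understanding the prospect\'s needs?'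
--             elif question['question_type'] == 'topics':
--                 customized_question['question_text'] = 'What specific pain points or challenges did the prospect share?'
--
--         elif meeting_type == 'demo':
--             if question['question_type'] == 'outcome':
--                 customized_question['question_text'] = 'How engaged was the prospect during the product demonstration?'
--             elif question['question_type'] == 'topics':
--                 customized_question['question_text'] = 'Which features or capabilities generated the most interest?'
--
--         elif meeting_type == 'negotiation':
--             if question['question_type'] == 'outcome':
--                 customized_question['question_text'] = 'What progress was made in the negotiation process?'
--             elif question['question_type'] == 'budget':
--                 customized_question['question_text'] = 'What specific pricing or contract terms were discussed?'
--
--         customized.append(customized_question)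
--
--     return customized
-- ===== SOURCE B (Python) =====
-- from typing import Dict, List, Any
--
-- _CUSTOMIZATIONS = {
--     'discovery': [
--         ('outcome', 'How successful was this discovery call in understanding the prospect\'s needs?'),
--         ('topics', 'What specific pain points or challenges did the prospect share?'),
--     ],
--     'demo': [
--         ('outcome', 'How engaged was the prospect during the product demonstration?'),
--         ('topics', 'Which features or capabilities generated the most interest?'),
--     ],
--     'negotiation': [
--         ('outcome', 'What progress was made in the negotiation process?'),
--         ('budget', 'What specific pricing or contract terms were discussed?'),
--     ],
-- }
--
--
-- def _customize_questions_for_meeting_type(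
--     questions: List[Dict[str, Any]],
--     meeting_type: str
-- ) -> List[Dict[str, Any]]:
--     """Customize questions based on meeting type.
--
--     Staged approach: copy everything first, then index question positions by
--     question_type, then walk the (at most two) override texts for this meeting
--     type and patch the indexed positions in place.
--     """
--     customized = [question.copy() for question in questions]
--     overrides = _CUSTOMIZATIONS.get(meeting_type)
--     if overrides is None:
--         return customized
--     positions = {}
--     for i, question in enumerate(questions):
--         positions.setdefault(question['question_type'], []).append(i)
--     for question_type, text in overrides:
--         for i in positions.get(question_type, []):
--             customized[i]['question_text'] = text
--     return customized
-- ===== Notes on version B (the rewrite author's own statement) =====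
-- stated objective: alternative
-- what changed: Instead of rewriting each question inside one loop of if/elif branches, B copies all questions first, builds an index from question_type to the list of positions holding it, then iterates the override texts for the meeting type and patches the indexed positions in place.
-- outside the precondition, e.g. on _customize_questions_for_meeting_type([{'x': 'y'}], 'demo'): A raises KeyError, B raises KeyError
import Mathlib
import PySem

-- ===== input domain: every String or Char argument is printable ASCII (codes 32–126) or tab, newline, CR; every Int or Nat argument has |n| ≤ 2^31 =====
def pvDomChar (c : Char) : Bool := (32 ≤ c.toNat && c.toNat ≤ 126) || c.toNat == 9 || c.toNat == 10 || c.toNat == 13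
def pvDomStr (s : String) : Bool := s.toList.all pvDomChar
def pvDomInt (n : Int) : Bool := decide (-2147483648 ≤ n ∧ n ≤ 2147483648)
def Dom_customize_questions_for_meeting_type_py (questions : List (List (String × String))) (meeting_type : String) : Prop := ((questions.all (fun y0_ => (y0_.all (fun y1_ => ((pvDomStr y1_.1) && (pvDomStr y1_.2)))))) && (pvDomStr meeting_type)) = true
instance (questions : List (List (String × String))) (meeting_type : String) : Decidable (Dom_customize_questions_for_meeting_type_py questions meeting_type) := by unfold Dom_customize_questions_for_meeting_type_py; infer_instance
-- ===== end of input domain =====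

-- B replaces A's single rewrite-as-you-go loop by staged passes: copy everything, index
-- positions by question_type once, then patch the indexed positions per override entry
-- (alternative decomposition; same O(n) cost).

-- Shared Python-dict primitives on the assoc-list representation (first-match lookup;
-- assignment overwrites the first matching key in place, otherwise appends).
def pyDictGet? {α : Type} (d : List (String × α)) (k : String) : Option α :=
  match d with
  | [] => none
  | (k', v) :: t => if k' == k then some v else pyDictGet? t k

def pyDictSet (d : List (String × String)) (k v : String) : List (String × String) :=
  match d with
  | [] => [(k, v)]
  | (k', v') :: t => if k' == k then (k', v) :: t else (k', v') :: pyDictSet t k v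

-- ===== PORT A =====
-- Literal transliteration of A's loop (accumulator list, if/elif chains in source order).
-- Where Python raises KeyError on question['question_type'] (missing key under a recognized
-- meeting type) the lookup is none and the comparisons are false; Pre_ excludes those inputs.
def customize_questions_for_meeting_type_py (questions : List (List (String × String))) (meeting_type : String) : List (List (String × String)) :=
  questions.foldl (fun customized question =>
    let c := question
    let c :=
      if meeting_type == "discovery" then
        if pyDictGet? question "question_type" == some "outcome" then
          pyDictSet c "question_text" "How successful was this discovery call in understanding the prospect's needs?"
        else if pyDictGet? question "question_type" == some "topics" then
          pyDictSet c "question_text" "What specific pain points or challenges did the prospect share?"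
        else c
      else if meeting_type == "demo" then
        if pyDictGet? question "question_type" == some "outcome" then
          pyDictSet c "question_text" "How engaged was the prospect during the product demonstration?"
        else if pyDictGet? question "question_type" == some "topics" then
          pyDictSet c "question_text" "Which features or capabilities generated the most interest?"
        else c
      else if meeting_type == "negotiation" then
        if pyDictGet? question "question_type" == some "outcome" then
          pyDictSet c "question_text" "What progress was made in the negotiation process?"
        else if pyDictGet? question "question_type" == some "budget" then
          pyDictSet c "question_text" "What specific pricing or contract terms were discussed?"
        else c
      else c
    customized ++ [c]) []

-- ===== PORT B =====
def pvCustomizations : List (String × List (String × String)) :=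
  [("discovery",
     [("outcome", "How successful was this discovery call in understanding the prospect's needs?"),
      ("topics", "What specific pain points or challenges did the prospect share?")]),
   ("demo",
     [("outcome", "How engaged was the prospect during the product demonstration?"),
      ("topics", "Which features or capabilities generated the most interest?")]),
   ("negotiation",
     [("outcome", "What progress was made in the negotiation process?"),
      ("budget", "What specific pricing or contract terms were discussed?")])]

-- positions.setdefault(qt, []).append(i)
def addPos (d : List (String × List Nat)) (k : String) (i : Nat) : List (String × List Nat) :=
  match d with
  | [] => [(k, [i])]
  | (k', l) :: t => if k' == k then (k', l ++ [i]) :: t else (k', l) :: addPos t k i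

-- the index-building pass: for i, question in enumerate(questions): positions.setdefault(...).append(i)
-- (where Python raises KeyError on a missing 'question_type' the lookup is none and the
-- question is skipped; Pre_ excludes those inputs)
def buildPositions (questions : List (List (String × String))) : List (String × List Nat) :=
  questions.zipIdx.foldl (fun d qi =>
    match pyDictGet? qi.1 "question_type" with
    | some qt => addPos d qt qi.2
    | none => d) []

-- positions.get(question_type, [])
def getPos (d : List (String × List Nat)) (k : String) : List Nat :=
  (pyDictGet? d k).getD []

-- customized[i]['question_text'] = text  (i is always in range in Python)
def applyAt (cs : List (List (String × String))) (i : Nat) (t : String) : List (List (String × String)) :=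
  match cs[i]? with
  | some q => cs.set i (pyDictSet q "question_text" t)
  | none => cs

-- Literal transliteration of B: copy all, look the meeting type up once, index the
-- positions by question_type, patch the indexed positions per override entry.
def customize_questions_for_meeting_type_py_alt (questions : List (List (String × String))) (meeting_type : String) : List (List (String × String)) :=
  let customized := questions.map (fun question => question)
  match pyDictGet? pvCustomizations meeting_type with
  | none => customized
  | some overrides =>
      let positions := buildPositions questions
      overrides.foldl (fun cs ov =>
        (getPos positions ov.1).foldl (fun cs i => applyAt cs i ov.2) cs) customized

-- ===== PRECONDITION & SPEC =====
-- Pre_ excludes exactly the inputs where A raises KeyError: a recognized meeting type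
-- with some question dict lacking the 'question_type' key (B raises there too).
def Pre_customize_questions_for_meeting_type_py (questions : List (List (String × String))) (meeting_type : String) : Prop :=
  (meeting_type = "discovery" ∨ meeting_type = "demo" ∨ meeting_type = "negotiation") →
    questions.all (fun q => q.any (fun p => p.1 == "question_type")) = true
instance (questions : List (List (String × String))) (meeting_type : String) : Decidable (Pre_customize_questions_for_meeting_type_py questions meeting_type) := by unfold Pre_customize_questions_for_meeting_type_py; infer_instance

def pvWitness_customize_questions_for_meeting_type_py : (List (List (String × String))) × String :=
  ([[("question_type", "outcome"), ("question_text", "old")]], "discovery")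

def Spec_customize_questions_for_meeting_type_py (questions : List (List (String × String))) (meeting_type : String) (out : List (List (String × String))) : Prop := out = customize_questions_for_meeting_type_py_alt questions meeting_type
instance (questions : List (List (String × String))) (meeting_type : String) (out : List (List (String × String))) : Decidable (Spec_customize_questions_for_meeting_type_py questions meeting_type out) := by unfold Spec_customize_questions_for_meeting_type_py; infer_instance

-- ===== CLAIM (what is proved, stated in full; the proofs are below) =====
def Claim_equal_customize_questions_for_meeting_type_py : Prop := ∀ (questions : List (List (String × String))) (meeting_type : String), Dom_customize_questions_for_meeting_type_py questions meeting_type → Pre_customize_questions_for_meeting_type_py questions meeting_type → Spec_customize_questions_for_meeting_type_py questions meeting_type (customize_questions_for_meeting_type_py questions meeting_type)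

-- ===== LEMMAS AND PROOFS =====

theorem foldl_append_singleton {α β : Type} (f : α → β) :
    ∀ (l : List α) (acc : List β),
      l.foldl (fun a x => a ++ [f x]) acc = acc ++ l.map f := by
  intro l
  induction l with
  | nil => simp
  | cons h t ih => intro acc; simp [List.foldl, ih]

-- addPos: the bucket of its key grows by [i]; other buckets are untouched
theorem getPos_addPos_same (k : String) (i : Nat) :
    ∀ (d : List (String × List Nat)), getPos (addPos d k i) k = getPos d k ++ [i] := by
  intro d
  induction d with
  | nil => simp [getPos, addPos, pyDictGet?]
  | cons h t ih =>
      obtain ⟨k', l⟩ := h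
      by_cases hk : k' = k
      · subst hk; simp [getPos, addPos, pyDictGet?]
      · have hb : (k' == k) = false := beq_eq_false_iff_ne.mpr hk
        simp [getPos, addPos, pyDictGet?, hb] at ih ⊢
        exact ih

theorem getPos_addPos_other (ka kb : String) (h : kb ≠ ka) (i : Nat) :
    ∀ (d : List (String × List Nat)), getPos (addPos d ka i) kb = getPos d kb := by
  intro d
  induction d with
  | nil =>
      have hb : (ka == kb) = false := beq_eq_false_iff_ne.mpr (fun e => h e.symm)
      simp [getPos, addPos, pyDictGet?, hb]
  | cons hd t ih =>
      obtain ⟨kc, l⟩ := hd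
      by_cases hk : kc = ka
      · subst hk
        have hb : (kc == kb) = false := beq_eq_false_iff_ne.mpr (fun e => h e.symm)
        simp [getPos, addPos, pyDictGet?, hb]
      · have hb : (kc == ka) = false := beq_eq_false_iff_ne.mpr hk
        by_cases hk2 : kc = kb
        · subst hk2; simp [getPos, addPos, pyDictGet?, hb]
        · have hb2 : (kc == kb) = false := beq_eq_false_iff_ne.mpr hk2
          simp [getPos, addPos, pyDictGet?, hb, hb2] at ih ⊢
          exact ih

-- which index each enumerate step contributes to bucket qt
def selIdx (qt : String) (qi : List (String × String) × Nat) : Option Nat :=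
  match pyDictGet? qi.1 "question_type" with
  | some q' => if q' == qt then some qi.2 else none
  | none => none

theorem getPos_buildFold (qt : String) :
    ∀ (l : List (List (String × String) × Nat)) (d : List (String × List Nat)),
      getPos (l.foldl (fun d qi =>
        match pyDictGet? qi.1 "question_type" with
        | some q' => addPos d q' qi.2
        | none => d) d) qt
      = getPos d qt ++ l.filterMap (selIdx qt) := by
  intro l
  induction l with
  | nil => simp
  | cons qi t ih =>
      intro d
      cases hq : pyDictGet? qi.1 "question_type" with
      | none =>
          have hs : selIdx qt qi = none := by simp [selIdx, hq]
          simp [List.foldl, hq, hs, ih]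
      | some q' =>
          by_cases he : q' = qt
          · subst he
            have hs : selIdx q' qi = some qi.2 := by simp [selIdx, hq]
            simp [List.foldl, hq, hs, ih, getPos_addPos_same]
          · have hb : (q' == qt) = false := beq_eq_false_iff_ne.mpr he
            have hs : selIdx qt qi = none := by simp [selIdx, hq, hb]
            simp [List.foldl, hq, hs, ih,
              getPos_addPos_other q' qt (fun e => he e.symm)]

theorem getPos_build (qs : List (List (String × String))) (qt : String) :
    getPos (buildPositions qs) qt = qs.zipIdx.filterMap (selIdx qt) := by
  unfold buildPositions
  rw [getPos_buildFold]
  simp [getPos, pyDictGet?]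

theorem mem_getPos_build {qs : List (List (String × String))} {qt : String} {i : Nat} :
    i ∈ getPos (buildPositions qs) qt ↔
      ∃ q, qs[i]? = some q ∧ pyDictGet? q "question_type" = some qt := by
  rw [getPos_build, List.mem_filterMap]
  constructor
  · rintro ⟨qi, hmem, hsel⟩
    unfold selIdx at hsel
    cases hq : pyDictGet? qi.1 "question_type" with
    | none => rw [hq] at hsel; exact absurd hsel (by simp)
    | some q' =>
        rw [hq] at hsel
        by_cases he : q' = qt
        · subst he
          simp at hsel
          refine ⟨qi.1, ?_, hq⟩
          rw [← hsel]
          exact List.mem_zipIdx_iff_getElem?.mp hmem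
        · have hb : (q' == qt) = false := beq_eq_false_iff_ne.mpr he
          simp [hb] at hsel
  · rintro ⟨q, hget, hq⟩
    refine ⟨(q, i), List.mem_zipIdx_iff_getElem?.mpr hget, ?_⟩
    simp [selIdx, hq]

theorem filterMap_selIdx_eq_map_filter (qt : String) :
    ∀ (l : List (List (String × String) × Nat)),
      l.filterMap (selIdx qt)
      = (l.filter (fun qi => pyDictGet? qi.1 "question_type" == some qt)).map Prod.snd := by
  intro l
  induction l with
  | nil => simp
  | cons qi t ih =>
      cases hq : pyDictGet? qi.1 "question_type" with
      | none =>
          have hs : selIdx qt qi = none := by simp [selIdx, hq]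
          have hc : (pyDictGet? qi.1 "question_type" == some qt) = false := by simp [hq]
          simp [hs, hc, ih]
      | some q' =>
          by_cases he : q' = qt
          · subst he
            have hs : selIdx q' qi = some qi.2 := by simp [selIdx, hq]
            have hc : (pyDictGet? qi.1 "question_type" == some q') = true := by simp [hq]
            simp [hs, hc, ih]
          · have hb : (q' == qt) = false := beq_eq_false_iff_ne.mpr he
            have hs : selIdx qt qi = none := by simp [selIdx, hq, hb]
            have hc : (pyDictGet? qi.1 "question_type" == some qt) = false := by
              simp [hq, he]
            simp [hs, hc, ih]

theorem nodup_getPos_build (qs : List (List (String × String))) (qt : String) :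
    (getPos (buildPositions qs) qt).Nodup := by
  rw [getPos_build, filterMap_selIdx_eq_map_filter]
  exact List.Sublist.nodup (List.Sublist.map Prod.snd List.filter_sublist)
    (List.nodup_zipIdx_map_snd qs)

-- applying one patch: the element at i is rewritten, everything else is untouched
theorem applyAt_getElem?_self (cs : List (List (String × String))) (i : Nat) (t : String) :
    (applyAt cs i t)[i]? = cs[i]?.map (fun q => pyDictSet q "question_text" t) := by
  cases h : cs[i]? with
  | none => simp [applyAt, h]
  | some q =>
      obtain ⟨hlt, -⟩ := List.getElem?_eq_some_iff.mp h
      simp [applyAt, h, List.getElem?_set_self hlt]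

theorem applyAt_getElem?_ne (cs : List (List (String × String))) {i j : Nat} (hij : i ≠ j) (t : String) :
    (applyAt cs i t)[j]? = cs[j]? := by
  cases h : cs[i]? with
  | none => simp [applyAt, h]
  | some q => simp [applyAt, h, List.getElem?_set_ne hij]

-- patching a duplicate-free position list rewrites exactly those positions
theorem setFoldSpec (t : String) :
    ∀ (P : List Nat) (cs : List (List (String × String))), P.Nodup →
      ∀ j, (P.foldl (fun cs i => applyAt cs i t) cs)[j]?
        = if j ∈ P then cs[j]?.map (fun q => pyDictSet q "question_text" t) else cs[j]? := by
  intro P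
  induction P with
  | nil => simp
  | cons i P' ih =>
      intro cs hnd j
      obtain ⟨hni, hnd'⟩ := List.nodup_cons.mp hnd
      rw [List.foldl_cons, ih _ hnd' j]
      by_cases hji : j = i
      · subst hji
        simp [hni, applyAt_getElem?_self]
      · rw [applyAt_getElem?_ne cs (fun e => hji e.symm) t]
        simp [List.mem_cons, hji]

-- the two staged patch passes produce the same list as a single per-question rewrite
theorem stagedApply_eq_map (qs : List (List (String × String))) (k1 k2 t1 t2 : String)
    (hk : k1 ≠ k2) :
    (getPos (buildPositions qs) k2).foldl (fun cs i => applyAt cs i t2)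
      ((getPos (buildPositions qs) k1).foldl (fun cs i => applyAt cs i t1)
        (qs.map (fun question => question)))
    = qs.map (fun q =>
        if pyDictGet? q "question_type" == some k1 then pyDictSet q "question_text" t1
        else if pyDictGet? q "question_type" == some k2 then pyDictSet q "question_text" t2
        else q) := by
  apply List.ext_getElem?
  intro j
  rw [setFoldSpec t2 _ _ (nodup_getPos_build qs k2),
      setFoldSpec t1 _ _ (nodup_getPos_build qs k1)]
  simp only [List.getElem?_map]
  cases hgj : qs[j]? with
  | none =>
      have h1 : j ∉ getPos (buildPositions qs) k1 := by
        intro hm; obtain ⟨q, hq, -⟩ := mem_getPos_build.mp hm; rw [hgj] at hq; cases hq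
      have h2 : j ∉ getPos (buildPositions qs) k2 := by
        intro hm; obtain ⟨q, hq, -⟩ := mem_getPos_build.mp hm; rw [hgj] at hq; cases hq
      simp [h1, h2]
  | some q =>
      cases hq : pyDictGet? q "question_type" with
      | none =>
          have h1 : j ∉ getPos (buildPositions qs) k1 := by
            intro hm; obtain ⟨q', hq', ht⟩ := mem_getPos_build.mp hm
            rw [hgj] at hq'; cases hq'; rw [hq] at ht; cases ht
          have h2 : j ∉ getPos (buildPositions qs) k2 := by
            intro hm; obtain ⟨q', hq', ht⟩ := mem_getPos_build.mp hm
            rw [hgj] at hq'; cases hq'; rw [hq] at ht; cases ht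
          simp [h1, h2, hq]
      | some qt =>
          have hmem : ∀ k, j ∈ getPos (buildPositions qs) k ↔ qt = k := by
            intro k
            rw [mem_getPos_build]
            constructor
            · rintro ⟨q', hq', ht⟩
              rw [hgj] at hq'; cases hq'; rw [hq] at ht; exact (Option.some_inj.mp ht)
            · rintro rfl; exact ⟨q, hgj, hq⟩
          by_cases he1 : qt = k1
          · subst he1
            have h1 : j ∈ getPos (buildPositions qs) qt := (hmem qt).mpr rfl
            have h2 : j ∉ getPos (buildPositions qs) k2 := fun hm => hk ((hmem k2).mp hm)
            simp [h1, h2, hq]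
          · have h1 : j ∉ getPos (buildPositions qs) k1 := fun hm => he1 ((hmem k1).mp hm)
            by_cases he2 : qt = k2
            · subst he2
              have h2 : j ∈ getPos (buildPositions qs) qt := (hmem qt).mpr rfl
              simp [h1, h2, hq, he1]
            · have h2 : j ∉ getPos (buildPositions qs) k2 := fun hm => he2 ((hmem k2).mp hm)
              simp [h1, h2, hq, he1, he2]

theorem pvCustomizations_get_none (mt : String)
    (h1 : mt ≠ "discovery") (h2 : mt ≠ "demo") (h3 : mt ≠ "negotiation") :
    pyDictGet? pvCustomizations mt = none := by
  have b1 : ("discovery" == mt) = false := beq_eq_false_iff_ne.mpr (fun h => h1 h.symm)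
  have b2 : ("demo" == mt) = false := beq_eq_false_iff_ne.mpr (fun h => h2 h.symm)
  have b3 : ("negotiation" == mt) = false := beq_eq_false_iff_ne.mpr (fun h => h3 h.symm)
  simp [pvCustomizations, pyDictGet?, b1, b2, b3]

theorem customize_questions_for_meeting_type_py_spec : Claim_equal_customize_questions_for_meeting_type_py := by
  intro questions meeting_type _ _
  unfold Spec_customize_questions_for_meeting_type_py
  unfold customize_questions_for_meeting_type_py customize_questions_for_meeting_type_py_alt
  rw [foldl_append_singleton]
  by_cases h1 : meeting_type = "discovery"
  · subst h1
    have hov : pyDictGet? pvCustomizations "discovery"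
        = some [("outcome", "How successful was this discovery call in understanding the prospect's needs?"),
                ("topics", "What specific pain points or challenges did the prospect share?")] := by decide
    rw [hov]
    simp only [List.foldl_cons, List.foldl_nil, List.nil_append]
    rw [stagedApply_eq_map questions "outcome" "topics" _ _ (by decide)]
    simp
  · by_cases h2 : meeting_type = "demo"
    · subst h2
      have hov : pyDictGet? pvCustomizations "demo"
          = some [("outcome", "How engaged was the prospect during the product demonstration?"),
                  ("topics", "Which features or capabilities generated the most interest?")] := by decide
      rw [hov]
      simp only [List.foldl_cons, List.foldl_nil, List.nil_append]
      rw [stagedApply_eq_map questions "outcome" "topics" _ _ (by decide)]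
      simp
    · by_cases h3 : meeting_type = "negotiation"
      · subst h3
        have hov : pyDictGet? pvCustomizations "negotiation"
            = some [("outcome", "What progress was made in the negotiation process?"),
                    ("budget", "What specific pricing or contract terms were discussed?")] := by decide
        rw [hov]
        simp only [List.foldl_cons, List.foldl_nil, List.nil_append]
        rw [stagedApply_eq_map questions "outcome" "budget" _ _ (by decide)]
        simp
      · rw [pvCustomizations_get_none meeting_type h1 h2 h3]
        simp [h1, h2, h3]
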